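-- pv_equiv track=rewrite | github.com/sirkosophia/V-GIFT | onevision/examples/llava_ov_1_5/sample_packing/hashbacket.py | factors_of_two
-- ===== SOURCE A (Python) =====
-- from typing import List, Tuple, Dict, Optional, Union, Set
--
-- def factors_of_two(a: int, C: int) -> List[Tuple[int, int]]:
--     """Return all pairs of (b, n) that satisfy b * 2^n = a and b > C"""
--     if a < 0 or C < 0:
--         raise ValueError("a must be a positive integer and C must be a non-negative integer")
--     res = []
--     n = 0
--     b = a
--     while b > C:
--         res.append((b, n))
--         if b & 1:
--             break
--         b >>= 1
--         n += 1
--     return res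
-- ===== SOURCE B (Python) =====
-- def _val2(t):
--     """2-adic valuation of a positive integer, by recursion on halving."""
--     if t % 2:
--         return 0
--     return 1 + _val2(t // 2)
--
--
-- def factors_of_two(a, C):
--     """Return all pairs of (b, n) that satisfy b * 2^n = a and b > C"""
--     if a < 0 or C < 0:
--         raise ValueError("a must be a positive integer and C must be a non-negative integer")
--     if a == 0:
--         return []
--     v = _val2(a)
--     return [(a >> k, k) for k in range(v + 1) if a >> k > C]
-- ===== Notes on version B (the rewrite author's own statement) =====
-- stated objective: alternative
-- what changed: Instead of A's single while-loop that accumulates pairs while halving and breaks on oddness or the C-bound, B first computes the 2-adic valuation v of a by a recursive helper and then builds the answer as one comprehension [(a>>k,k) for k in range(v+1) if a>>k>C], relying on a>>k being decreasing so the filter is exactly A's stopping prefix.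
import Mathlib
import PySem

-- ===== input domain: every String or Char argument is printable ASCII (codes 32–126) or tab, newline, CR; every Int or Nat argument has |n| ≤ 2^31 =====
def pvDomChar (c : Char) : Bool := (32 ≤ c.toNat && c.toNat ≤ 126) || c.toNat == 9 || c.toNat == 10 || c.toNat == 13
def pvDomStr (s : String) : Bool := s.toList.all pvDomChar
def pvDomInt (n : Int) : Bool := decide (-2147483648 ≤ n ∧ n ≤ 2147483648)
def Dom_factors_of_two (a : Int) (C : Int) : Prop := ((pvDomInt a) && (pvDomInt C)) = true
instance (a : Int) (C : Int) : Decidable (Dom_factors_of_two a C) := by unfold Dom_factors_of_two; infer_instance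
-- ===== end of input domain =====

-- B computes the 2-adic valuation first (recursive helper) and builds the result as one
-- filtered range comprehension; same return values as A's accumulate-and-break while-loop.

-- ===== PORT A =====
-- A's while-loop, step for step; the fuel argument only makes the recursion total
-- (it is never exhausted on Pre_ inputs).
def loopA (C : Int) : Nat → Int → Int → List (Int × Int) → List (Int × Int)
  | 0, _, _, res => res
  | fuel + 1, b, n, res =>
    if b > C then
      if PySem.Int.mod b 2 ≠ 0 then res ++ [(b, n)]
      else loopA C fuel (PySem.Int.floordiv b 2) (n + 1) (res ++ [(b, n)])
    else res

def factors_of_two (a : Int) (C : Int) : List (Int × Int) :=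
  if a < 0 ∨ C < 0 then []  -- Python raises ValueError here; excluded by Pre_
  else loopA C (a.natAbs + 1) a 0 []

-- ===== PORT B =====
-- Source B's recursive _val2; fuel only makes the recursion total (never exhausted on Pre_ inputs).
def val2 : Nat → Int → Int
  | 0, _ => 0
  | fuel + 1, t => if PySem.Int.mod t 2 ≠ 0 then 0 else 1 + val2 fuel (PySem.Int.floordiv t 2)

def factors_of_two_alt (a : Int) (C : Int) : List (Int × Int) :=
  if a < 0 ∨ C < 0 then []  -- Python raises ValueError here; excluded by Pre_
  else if a = 0 then []
  else
    ((PySem.List.pyRange 0 (val2 a.natAbs a + 1) 1).filter (fun k => decide (a >>> k.toNat > C))).map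
      (fun k => (a >>> k.toNat, k))

-- ===== PRECONDITION & SPEC =====
-- Pre_ excludes exactly the inputs on which A raises ValueError (a < 0 or C < 0).
def Pre_factors_of_two (a : Int) (C : Int) : Prop := 0 ≤ a ∧ 0 ≤ C
instance (a : Int) (C : Int) : Decidable (Pre_factors_of_two a C) := by unfold Pre_factors_of_two; infer_instance
def pvWitness_factors_of_two : Int × Int := (96, 2)

def Spec_factors_of_two (a : Int) (C : Int) (out : List (Int × Int)) : Prop := out = factors_of_two_alt a C
instance (a : Int) (C : Int) (out : List (Int × Int)) : Decidable (Spec_factors_of_two a C out) := by unfold Spec_factors_of_two; infer_instance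

-- ===== CLAIM (what is proved, stated in full; the proofs are below) =====
def Claim_equal_factors_of_two : Prop := ∀ (a : Int) (C : Int), Dom_factors_of_two a C → Pre_factors_of_two a C → Spec_factors_of_two a C (factors_of_two a C)

-- ===== LEMMAS AND PROOFS =====
theorem pv_val2_eq (v m : Nat) (hm : m % 2 = 1) :
    ∀ fuel, v + 1 ≤ fuel → val2 fuel ((2 ^ v * m : Nat) : Int) = (v : Int) := by
  induction v with
  | zero =>
    intro fuel hf
    obtain ⟨f, rfl⟩ : ∃ f, fuel = f + 1 := ⟨fuel - 1, by omega⟩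
    have hmod : PySem.Int.mod ((2 ^ 0 * m : Nat) : Int) 2 = 1 := by
      rw [show ((2:Int)) = ((2:Nat):Int) by norm_num, PySem.Int.mod_natCast]
      simp [hm]
    simp only [val2]; rw [hmod]; simp
  | succ v ih =>
    intro fuel hf
    obtain ⟨f, rfl⟩ : ∃ f, fuel = f + 1 := ⟨fuel - 1, by omega⟩
    have hmod : PySem.Int.mod ((2 ^ (v+1) * m : Nat) : Int) 2 = 0 := by
      rw [show ((2:Int)) = ((2:Nat):Int) by norm_num, PySem.Int.mod_natCast]
      simp [Nat.mul_mod, Nat.pow_mod]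
    have hdiv : PySem.Int.floordiv ((2 ^ (v+1) * m : Nat) : Int) 2 = ((2 ^ v * m : Nat) : Int) := by
      rw [show ((2:Int)) = ((2:Nat):Int) by norm_num, PySem.Int.floordiv_natCast]
      congr 1
      rw [pow_succ, mul_comm (2^v) 2, mul_assoc, Nat.mul_div_cancel_left _ (by norm_num)]
    simp only [val2, hmod, hdiv, ne_eq, not_true_eq_false, if_false]
    rw [ih f (by omega)]
    push_cast; ring

theorem pv_shift_pow (v m k : Nat) (hk : k ≤ v) :
    (((2 ^ v * m : Nat) : Int) >>> ((k : Nat) : Int)) = ((2 ^ (v - k) * m : Nat) : Int) := by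
  rw [Int.shiftRight_natCast, Nat.shiftRight_eq_div_pow]
  congr 1
  rw [show (2:Nat)^v = 2^k * 2^(v-k) by rw [← pow_add]; congr 1; omega, mul_assoc,
    Nat.mul_div_cancel_left]
  positivity


theorem pv_filter_nil (C : Int) (v m j : Nat) (hjv : j ≤ v)
    (hb : ¬ (((2 ^ (v - j) * m : Nat) : Int) > C)) :
    (PySem.List.pyRange (j:Int) ((v:Int)+1) 1).filter
      (fun k => decide ((((2 ^ v * m : Nat) : Int)) >>> ((k.toNat : Nat) : Int) > C)) = [] := by
  rw [List.filter_eq_nil_iff]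
  intro k hk
  rw [PySem.List.mem_pyRange_one] at hk
  have hk2 : k.toNat ≤ v := by omega
  rw [decide_eq_true_eq, pv_shift_pow v m k.toNat hk2]
  have hle : 2 ^ (v - k.toNat) * m ≤ 2 ^ (v - j) * m :=
    Nat.mul_le_mul_right m (Nat.pow_le_pow_right (by norm_num) (by omega))
  push Not at hb ⊢
  calc ((2 ^ (v - k.toNat) * m : Nat) : Int) ≤ ((2 ^ (v - j) * m : Nat) : Int) := by exact_mod_cast hle
    _ ≤ C := hb

theorem pv_loopA_eq (C : Int) (v m : Nat) (hm : m % 2 = 1) :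
    ∀ d j res fuel, j + d = v → d + 1 ≤ fuel →
      loopA C fuel ((((2 ^ v * m : Nat) : Int)) >>> ((j : Nat) : Int)) (j : Int) res =
      res ++ ((PySem.List.pyRange (j : Int) ((v : Int) + 1) 1).filter
                (fun k => decide ((((2 ^ v * m : Nat) : Int)) >>> ((k.toNat : Nat) : Int) > C))).map
              (fun k => ((((2 ^ v * m : Nat) : Int)) >>> ((k.toNat : Nat) : Int), k)) := by
  intro d
  induction d with
  | zero =>
    intro j res fuel hjv hf
    obtain ⟨f, rfl⟩ : ∃ f, fuel = f + 1 := ⟨fuel - 1, by omega⟩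
    obtain rfl : j = v := by omega
    rw [pv_shift_pow j m j le_rfl]
    by_cases hb : ((2 ^ (j - j) * m : Nat) : Int) > C
    · have hmod : PySem.Int.mod ((2 ^ (j - j) * m : Nat) : Int) 2 = 1 := by
        rw [show ((2:Int)) = ((2:Nat):Int) by norm_num, PySem.Int.mod_natCast]
        simp [hm]
      rw [PySem.List.pyRange_one_cons (by omega)]
      simp only [loopA, hmod, if_pos hb]
      have hv : ((j:Int)).toNat = j := Int.toNat_natCast j
      have hnil : PySem.List.pyRange ((j:Int)+1) ((j:Int)+1) 1 = [] := by
        rw [PySem.List.pyRange_one]; simp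
      simp only [hnil, List.filter_cons, List.filter_nil, hv, pv_shift_pow j m j le_rfl, hb,
        decide_true, List.map_cons, List.map_nil, if_true]
      split_ifs with h1
      · rfl
      · norm_num at h1
    · simp only [loopA, if_neg hb, pv_filter_nil C j m j le_rfl hb, List.map_nil,
        List.append_nil]
  | succ d ih =>
    intro j res fuel hjv hf
    obtain ⟨f, rfl⟩ : ∃ f, fuel = f + 1 := ⟨fuel - 1, by omega⟩
    have hjlt : j < v := by omega
    rw [pv_shift_pow v m j (by omega)]
    by_cases hb : ((2 ^ (v - j) * m : Nat) : Int) > C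
    · have hvj : v - j = d + 1 := by omega
      have hmod : PySem.Int.mod ((2 ^ (v - j) * m : Nat) : Int) 2 = 0 := by
        rw [show ((2:Int)) = ((2:Nat):Int) by norm_num, PySem.Int.mod_natCast, hvj]
        simp [Nat.mul_mod, Nat.pow_mod]
      have hdiv : PySem.Int.floordiv ((2 ^ (v - j) * m : Nat) : Int) 2
          = (((2 ^ v * m : Nat) : Int)) >>> (((j + 1 : Nat) : Nat) : Int) := by
        rw [show ((2:Int)) = ((2:Nat):Int) by norm_num, PySem.Int.floordiv_natCast,
          pv_shift_pow v m (j+1) (by omega)]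
        congr 1
        rw [hvj, show v - (j+1) = d by omega, pow_succ, mul_comm (2^d) 2, mul_assoc,
          Nat.mul_div_cancel_left _ (by norm_num)]
      simp only [loopA, if_pos hb, hmod, ne_eq, not_true_eq_false, if_false, hdiv]
      have hcast : ((j:Int)) + 1 = ((j + 1 : Nat) : Int) := by push_cast; ring
      rw [hcast, ih (j+1) (res ++ [(((2 ^ (v - j) * m : Nat) : Int), (j:Int))]) f (by omega) (by omega)]
      rw [PySem.List.pyRange_one_cons (show (j:Int) < (v:Int) + 1 by omega)]
      have hj : ((j:Int)).toNat = j := Int.toNat_natCast j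
      rw [List.filter_cons]
      simp only [hj, pv_shift_pow v m j (by omega), hcast, List.append_assoc,
        List.cons_append, List.nil_append]
      rw [if_pos (show decide ((((2 ^ (v - j) * m : Nat) : Int)) > C) = true from decide_eq_true hb)]
      simp only [List.map_cons, hj, pv_shift_pow v m j (by omega)]
    · simp only [loopA, if_neg hb, pv_filter_nil C v m j (by omega) hb, List.map_nil,
        List.append_nil]

theorem pv_main (a C : Int) (ha : 0 ≤ a) (hC : 0 ≤ C) :
    factors_of_two a C = factors_of_two_alt a C := by
  unfold factors_of_two factors_of_two_alt
  rw [if_neg (show ¬(a < 0 ∨ C < 0) by omega), if_neg (show ¬(a < 0 ∨ C < 0) by omega)]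
  by_cases h0 : a = 0
  · subst h0
    rw [if_pos rfl]
    show loopA C 1 0 0 [] = []
    simp only [loopA]
    rw [if_neg (show ¬((0:Int) > C) by omega)]
  · rw [if_neg h0]
    obtain ⟨v, m, hmodd, hnm⟩ := Nat.exists_eq_two_pow_mul_odd (show a.toNat ≠ 0 by omega)
    have hm : m % 2 = 1 := Nat.odd_iff.mp hmodd
    have ha' : a = ((2 ^ v * m : Nat) : Int) := by rw [← hnm]; omega
    have hvlt : v < 2 ^ v * m :=
      lt_of_lt_of_le Nat.lt_two_pow_self (Nat.le_mul_of_pos_right _ (by omega))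
    rw [ha']
    rw [show (((2 ^ v * m : Nat) : Int)).natAbs = 2 ^ v * m from Int.natAbs_natCast _]
    rw [pv_val2_eq v m hm (2 ^ v * m) (by omega)]
    have h := pv_loopA_eq C v m hm v 0 [] (2 ^ v * m + 1) (by omega) (by omega)
    simp only [Nat.cast_zero, List.nil_append] at h
    exact h

-- ===== VERDICT (by name: the statement is the Claim_ definition above) =====
theorem factors_of_two_spec : Claim_equal_factors_of_two := by
  intro a C _ hPre
  unfold Spec_factors_of_two
  exact pv_main a C hPre.1 hPre.2
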